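-- pv_equiv track=rewrite | github.com/prathamesh799/Competitive-Programming-elective-4 | 05-nthwithproperty309-Python/nthwithproperty309.py | hasProperty309
-- ===== SOURCE A (Python) =====
-- def hasProperty309(num):
-- 	d = {k:0 for k in range(10)}
-- 	num = num ** 5
-- 	while num > 0:
-- 		rem = num % 10
-- 		d[rem] = 1
-- 		num //= 10
-- 	return sum(d.values()) == 10
-- ===== SOURCE B (Python) =====
-- def hasProperty309(num):
--     s = str(num ** 5)
--     return num > 0 and all(d in s for d in "0123456789")
-- ===== Notes on version B (the rewrite author's own statement) =====
-- stated objective: idiomatic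
-- what changed: Instead of one digit-extraction pass that marks presence in a dict, B converts the fifth power to a string once and runs ten independent substring-membership scans, one per required digit '0'..'9', with no presence structure at all; the positivity guard is on num itself (num**5 > 0 iff num > 0 for the odd power).
import Mathlib
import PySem

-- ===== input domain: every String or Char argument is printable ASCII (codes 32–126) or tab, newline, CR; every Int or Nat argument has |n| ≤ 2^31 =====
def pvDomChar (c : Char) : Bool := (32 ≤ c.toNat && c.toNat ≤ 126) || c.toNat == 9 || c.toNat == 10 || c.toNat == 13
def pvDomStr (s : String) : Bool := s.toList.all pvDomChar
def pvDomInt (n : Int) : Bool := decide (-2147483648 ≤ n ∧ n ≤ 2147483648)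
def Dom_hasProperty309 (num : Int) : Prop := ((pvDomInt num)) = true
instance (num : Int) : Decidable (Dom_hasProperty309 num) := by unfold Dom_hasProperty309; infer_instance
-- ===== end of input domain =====

-- B drops A's presence dict: it stringifies num**5 once and runs ten independent
-- substring-membership scans, one per required digit (idiomatic; same order of cost).


-- ===== PORT A =====
-- the 'while num > 0' loop: d[num % 10] = 1; num //= 10
def hasProperty309Loop (num : Int) (d : PySem.Dict Int Int) : PySem.Dict Int Int :=
  if _h : 0 < num then
    hasProperty309Loop (PySem.Int.floordiv num 10) (d.insert (PySem.Int.mod num 10) 1)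
  else d
termination_by num.toNat
decreasing_by
  have h10 : PySem.Int.floordiv num 10 = ((num.toNat / 10 : Nat) : Int) := by
    rw [PySem.Int.floordiv, Int.fdiv_eq_ediv]
    simp; omega
  rw [h10]
  simp only [Int.toNat_natCast]
  exact Nat.div_lt_self (by omega) (by omega)

def hasProperty309 (num : Int) : Bool :=
  -- d = {k:0 for k in range(10)}
  let d : PySem.Dict Int Int :=
    (PySem.List.pyRange 0 10 1).foldl (fun d k => d.insert k 0) PySem.Dict.empty
  let n := num ^ 5
  let d := hasProperty309Loop n d
  decide (d.values.sum = (10 : Int))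

-- ===== PORT B =====
-- s = str(num ** 5); return num > 0 and all(d in s for d in "0123456789")
def hasProperty309_alt (num : Int) : Bool :=
  let s := PySem.Int.toStr (num ^ 5)
  decide (0 < num) && ("0123456789".toList.all fun d => PySem.Str.isIn (String.mk [d]) s)

-- ===== PRECONDITION & SPEC =====
def Spec_hasProperty309 (num : Int) (out : Bool) : Prop := out = hasProperty309_alt num
instance (num : Int) (out : Bool) : Decidable (Spec_hasProperty309 num out) := by unfold Spec_hasProperty309; infer_instance

-- ===== CLAIM (what is proved, stated in full; the proofs are below) =====
def Claim_equal_hasProperty309 : Prop := ∀ (num : Int), Dom_hasProperty309 num → Spec_hasProperty309 num (hasProperty309 num)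

-- ===== LEMMAS AND PROOFS =====

-- the ten-entry dict with keys 0..9 (in order) and value function f
def mk10 (f : Nat → Int) : PySem.Dict Int Int :=
  PySem.Dict.mk ((List.range 10).map fun (k : Nat) => ((k : Int), f k))

theorem mk10_base :
    (PySem.List.pyRange 0 10 1).foldl (fun d k => d.insert k 0) PySem.Dict.empty
      = mk10 (fun _ => 0) := by decide

theorem mem_keys_mk10 (f : Nat → Int) (r : Int) :
    r ∈ (mk10 f).keys ↔ 0 ≤ r ∧ r < 10 := by
  simp only [mk10, PySem.Dict.keys_mk, List.map_map, Function.comp, List.mem_map,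
    List.mem_range]
  constructor
  · rintro ⟨k, hk, rfl⟩; constructor <;> [positivity; exact_mod_cast hk]
  · rintro ⟨h0, h10⟩
    exact ⟨r.toNat, by omega, by omega⟩

theorem insert_mk10 (f : Nat → Int) (r : Int) (h0 : 0 ≤ r) (h10 : r < 10) :
    (mk10 f).insert r 1 = mk10 (fun k => if (k : Int) = r then 1 else f k) := by
  have hc : (mk10 f).contains r = true := by
    rw [PySem.Dict.contains_eq_decide_mem_keys]
    simp [mem_keys_mk10, h0, h10]
  apply PySem.Dict.ext
  rw [PySem.Dict.items_insert_of_contains _ _ hc]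
  show List.map _ ((List.range 10).map fun (k : Nat) => ((k : Int), f k)) = _
  rw [List.map_map]
  show _ = (List.range 10).map fun (k : Nat) => ((k : Int), if (k : Int) = r then 1 else f k)
  apply List.map_congr_left
  intro k _
  by_cases h : (k : Int) = r <;> simp [Function.comp, h]

theorem foldl_insert_mk10 (L : List Int) (f : Nat → Int)
    (hL : ∀ r ∈ L, 0 ≤ r ∧ r < 10) :
    L.foldl (fun d r => d.insert r 1) (mk10 f)
      = mk10 (fun k => if (k : Int) ∈ L then 1 else f k) := by
  induction L generalizing f with
  | nil => simp
  | cons r t ih =>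
    have hr := hL r (by simp)
    simp only [List.foldl_cons]
    rw [insert_mk10 f r hr.1 hr.2, ih _ (fun x hx => hL x (by simp [hx]))]
    congr 1
    funext k
    by_cases h1 : (k : Int) ∈ t
    · simp [h1]
    · by_cases h2 : (k : Int) = r <;> simp [h1, h2]

-- the while loop marks exactly the decimal digits of n.toNat
theorem loop_eq_foldl (n : Int) (d : PySem.Dict Int Int) :
    hasProperty309Loop n d
      = ((Nat.digits 10 n.toNat).map (fun (r : Nat) => (r : Int))).foldl
          (fun d r => d.insert r 1) d := by
  by_cases h : 0 < n
  · have hm : 0 < n.toNat := by omega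
    generalize hk : n.toNat = m at *
    induction m using Nat.strong_induction_on generalizing n d with
    | _ m ih =>
      rw [hasProperty309Loop, dif_pos h]
      have hdiv : PySem.Int.floordiv n 10 = ((m / 10 : Nat) : Int) := by
        rw [PySem.Int.floordiv, Int.fdiv_eq_ediv]
        simp; omega
      have hmod : PySem.Int.mod n 10 = ((m % 10 : Nat) : Int) := by
        rw [PySem.Int.mod, Int.fmod_eq_emod]
        omega
      rw [hdiv, hmod, Nat.digits_def' (show 1 < 10 by omega) hm]
      simp only [List.map_cons, List.foldl_cons]
      by_cases h2 : 0 < m / 10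
      · exact ih (m / 10) (Nat.div_lt_self hm (by omega)) ((m / 10 : Nat) : Int)
          (d.insert ((m % 10 : Nat) : Int) 1) (by exact_mod_cast h2) (by omega) h2
      · have hz : m / 10 = 0 := by omega
        rw [hasProperty309Loop]
        simp [hz]
  · rw [hasProperty309Loop, dif_neg h]
    have : n.toNat = 0 := by omega
    simp [this]

theorem values_mk10 (f : Nat → Int) :
    (mk10 f).values = (List.range 10).map f := by
  simp [mk10, PySem.Dict.values_mk, List.map_map, Function.comp]

theorem sum_map_ite (l : List Nat) (P : Nat → Prop) [DecidablePred P] :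
    (l.map fun k => if P k then (1 : Int) else 0).sum
      = (l.countP fun k => decide (P k) : Nat) := by
  induction l with
  | nil => simp
  | cons a t ih =>
    by_cases h : P a <;> simp [h, ih] <;> ring

theorem digitChar_inj (a b : Nat) (ha : a < 10) (hb : b < 10)
    (h : Nat.digitChar a = Nat.digitChar b) : a = b := by
  interval_cases a <;> interval_cases b <;> simp_all [Nat.digitChar]

-- Nat.toDigits via Nat.digits
theorem toDigitsCore_succ (b f n : Nat) (ds : List Char) :
    Nat.toDigitsCore b (f + 1) n ds
      = if n / b = 0 then (n % b).digitChar :: ds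
        else Nat.toDigitsCore b f (n / b) ((n % b).digitChar :: ds) := rfl

theorem toDigitsCore_eq (fuel : Nat) : ∀ (m : Nat) (ds : List Char), 0 < m → m ≤ fuel →
    Nat.toDigitsCore 10 (fuel + 1) m ds
      = ((Nat.digits 10 m).map Nat.digitChar).reverse ++ ds := by
  induction fuel with
  | zero => intro m ds h1 h2; omega
  | succ f ih =>
    intro m ds h1 h2
    rw [toDigitsCore_succ]
    rw [Nat.digits_def' (show 1 < 10 by omega) h1]
    by_cases hz : m / 10 = 0
    · rw [if_pos hz]
      simp [hz]
    · rw [if_neg hz]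
      rw [ih (m / 10) _ (by omega) (by
        have := Nat.div_lt_self h1 (show 1 < 10 by omega); omega)]
      simp

theorem toDigits_eq (m : Nat) (h : 0 < m) :
    Nat.toDigits 10 m = ((Nat.digits 10 m).map Nat.digitChar).reverse := by
  rw [Nat.toDigits]
  cases m with
  | zero => omega
  | succ k =>
    rw [toDigitsCore_eq (k + 1) (k + 1) [] h (le_refl _)]
    simp

-- single-character 'd in s' is character membership
theorem isIn_singleton (d : Char) (s : String) :
    PySem.Str.isIn (String.mk [d]) s = true ↔ d ∈ s.toList := by
  rw [PySem.Str.isIn_iff_infix]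
  have : (String.mk [d]).toList = [d] := Eq.symm (String.ofList_eq.mp rfl)
  rw [this]
  constructor
  · intro h
    exact (List.singleton_sublist).mp h.sublist
  · intro h
    obtain ⟨l1, l2, h2⟩ := List.append_of_mem h
    rw [h2]
    exact ⟨l1, l2, by simp⟩

-- "0123456789" lists the digit characters in order
theorem digit_string_eq : "0123456789".toList = (List.range 10).map Nat.digitChar := by
  decide

-- num ** 5 is positive exactly when num is
theorem pow5_pos_iff (num : Int) : 0 < num ^ 5 ↔ 0 < num :=
  Odd.pow_pos_iff (by norm_num)

-- the two ports agree (unconditionally)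
theorem main_eq (num : Int) : hasProperty309 num = hasProperty309_alt num := by
  unfold hasProperty309 hasProperty309_alt
  simp only [mk10_base]
  rw [loop_eq_foldl]
  have hlt : ∀ r ∈ Nat.digits 10 (num ^ 5).toNat, r < 10 :=
    fun r hr => Nat.digits_lt_base (by omega) hr
  have hL : ∀ r ∈ (Nat.digits 10 (num ^ 5).toNat).map (fun (r : Nat) => (r : Int)),
      0 ≤ r ∧ r < 10 := by
    intro r hr
    obtain ⟨k, hk, rfl⟩ := List.mem_map.mp hr
    have := hlt k hk; omega
  rw [foldl_insert_mk10 _ _ hL, values_mk10, sum_map_ite]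
  have hmem : ∀ k : Nat,
      ((k : Int) ∈ (Nat.digits 10 (num ^ 5).toNat).map (fun (r : Nat) => (r : Int)))
        ↔ k ∈ Nat.digits 10 (num ^ 5).toNat := by
    intro k
    constructor
    · intro h
      obtain ⟨j, hj, hjk⟩ := List.mem_map.mp h
      have : j = k := by exact_mod_cast hjk
      exact this ▸ hj
    · intro h; exact List.mem_map.mpr ⟨k, h, rfl⟩
  rw [Bool.eq_iff_iff]
  by_cases hpos : 0 < num
  · have hp5 : 0 < num ^ 5 := (pow5_pos_iff num).mpr hpos
    have h0m : 0 < (num ^ 5).toNat := by omega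
    -- characters of str(num**5)
    have hchars : (PySem.Int.toStr (num ^ 5)).toList
        = ((Nat.digits 10 (num ^ 5).toNat).map Nat.digitChar).reverse := by
      rw [PySem.Int.toList_toStr, PySem.Int.toChars, if_neg (by omega), toDigits_eq _ h0m]
    simp only [digit_string_eq, List.all_map, List.all_eq_true, Function.comp,
      Bool.and_eq_true, decide_eq_true_eq]
    constructor
    · intro hsum
      refine ⟨hpos, fun k hk => ?_⟩
      have hk10 : k < 10 := List.mem_range.mp hk
      have h10 : ((List.range 10).countP
          fun (j : Nat) => decide ((j : Int) ∈ (Nat.digits 10 (num ^ 5).toNat).map (fun (r : Nat) => (r : Int)))) = 10 := by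
        exact_mod_cast hsum
      have hall := List.countP_eq_length.mp (by rw [h10]; simp)
      have hkmem : k ∈ Nat.digits 10 (num ^ 5).toNat :=
        (hmem k).mp (by simpa using hall k hk)
      rw [isIn_singleton, hchars]
      simp only [List.mem_reverse, List.mem_map]
      exact ⟨k, hkmem, rfl⟩
    · rintro ⟨-, hall⟩
      have hdig : ∀ k < 10, k ∈ Nat.digits 10 (num ^ 5).toNat := by
        intro k hk
        have := hall k (List.mem_range.mpr hk)
        rw [isIn_singleton, hchars] at this
        simp only [List.mem_reverse, List.mem_map] at this
        obtain ⟨j, hj, hjk⟩ := this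
        exact (digitChar_inj j k (hlt j hj) hk hjk) ▸ hj
      have hlen : ((List.range 10).countP
          fun (j : Nat) => decide ((j : Int) ∈ (Nat.digits 10 (num ^ 5).toNat).map (fun (r : Nat) => (r : Int))))
            = (List.range 10).length :=
        List.countP_eq_length.mpr
          (fun a ha => by simpa [hmem a] using hdig a (List.mem_range.mp ha))
      have : ((List.range 10).countP
          fun (j : Nat) => decide ((j : Int) ∈ (Nat.digits 10 (num ^ 5).toNat).map (fun (r : Nat) => (r : Int)))) = 10 := by
        simpa using hlen
      exact_mod_cast this
  · -- num ≤ 0: no digits were marked and B's guard is false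
    have hp5 : ¬ 0 < num ^ 5 := fun h => hpos ((pow5_pos_iff num).mp h)
    have hz : (num ^ 5).toNat = 0 := by omega
    simp [hz, hpos]

-- ===== VERDICT (by name: the statement is the Claim_ definition above) =====
theorem hasProperty309_spec : Claim_equal_hasProperty309 := by
  intro num _
  unfold Spec_hasProperty309
  exact main_eq num
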